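-- pv_equiv track=rewrite | github.com/timendum/dimmiouija | summarizer.py | _authors
-- ===== SOURCE A (Python) =====
-- from typing import Dict, List, Tuple, Union
--
-- def _authors(authors: List[Tuple[str, int]]) -> str:
--     text = '## Autori delle domande\n\n'
--     text += 'Gli utenti che hanno posto più domande sono stati: \n\n'
--     value = None
--     for idx, user in enumerate(reversed(authors)):
--         if value != user[1] and idx > 4:
--             break
--         value = user[1]
--         text += '1. /u/{text} ({extra})\n'.format(text=user[0], extra=user[1])
--     return text
-- ===== SOURCE B (Python) =====
-- def _authors(authors):
--     header = ('## Autori delle domande\n\n'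
--               'Gli utenti che hanno posto più domande sono stati: \n\n')
--     rev = authors[::-1]
--     head, tail = rev[:5], rev[5:]
--     selected = list(head)
--     if head:
--         last = head[-1][1]
--         for user in tail:
--             if user[1] != last:
--                 break
--             selected.append(user)
--     return header + ''.join('1. /u/{} ({})\n'.format(name, count)
--                             for name, count in selected)
-- ===== Notes on version B (the rewrite author's own statement) =====
-- stated objective: simpler
-- what changed: B separates selection from formatting: it takes the first 5 of the reversed list, extends it with a takeWhile over the run of equal counts, and formats the selection in one join, instead of A's fused append-and-break loop tracking idx/value/text state.
import Mathlib
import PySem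

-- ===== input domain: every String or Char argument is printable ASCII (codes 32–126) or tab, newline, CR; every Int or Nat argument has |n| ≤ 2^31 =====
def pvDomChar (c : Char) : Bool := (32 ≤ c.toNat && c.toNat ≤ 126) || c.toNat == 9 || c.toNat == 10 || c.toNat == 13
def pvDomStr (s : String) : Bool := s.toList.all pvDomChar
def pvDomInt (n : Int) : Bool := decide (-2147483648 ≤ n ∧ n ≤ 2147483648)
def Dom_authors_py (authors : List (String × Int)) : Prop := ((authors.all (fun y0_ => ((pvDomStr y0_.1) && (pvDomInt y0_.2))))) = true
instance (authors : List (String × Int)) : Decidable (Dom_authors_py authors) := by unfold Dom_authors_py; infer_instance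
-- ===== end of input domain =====

-- B splits selection (take 5, then extend the run of equal counts) from formatting,
-- replacing A's fused append-and-break loop; objective: simpler decomposition, same cost.

-- ===== PORT A =====
-- '1. /u/{text} ({extra})\n'.format(...)
def fmtA (u : String × Int) : String := "1. /u/" ++ u.1 ++ " (" ++ PySem.Int.toStr u.2 ++ ")\n"

-- the for-loop over enumerate(reversed(authors)) with its break, state = (idx, value, text)
def loopA : List (String × Int) → Nat → Option Int → String → String
  | [], _, _, text => text
  | u :: t, idx, value, text =>
    if value ≠ some u.2 ∧ idx > 4 then text
    else loopA t (idx + 1) (some u.2) (text ++ fmtA u)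

def authors_py (authors : List (String × Int)) : String :=
  loopA authors.reverse 0 none
    ("## Autori delle domande\n\n" ++ "Gli utenti che hanno posto più domande sono stati: \n\n")

-- ===== PORT B =====
def fmtB (u : String × Int) : String := "1. /u/" ++ u.1 ++ " (" ++ PySem.Int.toStr u.2 ++ ")\n"

def authors_py_alt (authors : List (String × Int)) : String :=
  let header := "## Autori delle domande\n\n" ++ "Gli utenti che hanno posto più domande sono stati: \n\n"
  let rev := authors.reverse          -- authors[::-1]
  let head := rev.take 5              -- rev[:5]
  let tail := rev.drop 5              -- rev[5:]
  let selected :=                     -- head, extended while tail's count equals head[-1][1]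
    match head.getLast? with
    | none => head
    | some l => head ++ tail.takeWhile (fun u : String × Int => u.2 == l.2)
  header ++ String.join (selected.map fmtB)

-- ===== PRECONDITION & SPEC =====
def Spec_authors_py (authors : List (String × Int)) (out : String) : Prop := out = authors_py_alt authors
instance (authors : List (String × Int)) (out : String) : Decidable (Spec_authors_py authors out) := by unfold Spec_authors_py; infer_instance

-- ===== CLAIM (what is proved, stated in full; the proofs are below) =====
def Claim_equal_authors_py : Prop := ∀ (authors : List (String × Int)), Dom_authors_py authors → Spec_authors_py authors (authors_py authors)

-- ===== LEMMAS AND PROOFS =====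

theorem join_nil_str : String.join [] = "" := rfl

theorem foldl_append_str (l : List String) (a : String) :
    l.foldl (· ++ ·) a = a ++ l.foldl (· ++ ·) "" := by
  induction l generalizing a with
  | nil => simp [List.foldl]
  | cons s t ih =>
    simp only [List.foldl]
    rw [ih (a ++ s), ih ("" ++ s), String.empty_append, String.append_assoc]

theorem join_cons_str (s : String) (l : List String) :
    String.join (s :: l) = s ++ String.join l := by
  simp only [String.join, List.foldl]
  rw [foldl_append_str, String.empty_append]

theorem join_append_str (l₁ l₂ : List String) :
    String.join (l₁ ++ l₂) = String.join l₁ ++ String.join l₂ := by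
  induction l₁ with
  | nil => simp [join_nil_str, String.empty_append]
  | cons s t ih => rw [List.cons_append, join_cons_str, join_cons_str, ih, String.append_assoc]

theorem fmtB_eq_fmtA : fmtB = fmtA := rfl

-- pull the accumulator out of A's loop
theorem loopA_text (r : List (String × Int)) (idx : Nat) (v : Option Int) (text : String) :
    loopA r idx v text = text ++ loopA r idx v "" := by
  induction r generalizing idx v text with
  | nil => simp [loopA, String.append_empty]
  | cons u t ih =>
    simp only [loopA]
    split
    · rw [String.append_empty]
    · rw [ih _ _ (text ++ fmtA u), ih _ _ ("" ++ fmtA u), String.empty_append,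
        String.append_assoc]

theorem loopA_cons (u : String × Int) (t : List (String × Int)) (idx : Nat) (v : Option Int) :
    loopA (u :: t) idx v "" =
      if v ≠ some u.2 ∧ idx > 4 then "" else fmtA u ++ loopA t (idx + 1) (some u.2) "" := by
  simp only [loopA]
  split
  · rfl
  · rw [loopA_text _ _ _ ("" ++ fmtA u), String.empty_append]

-- past index 4, A's loop is exactly a takeWhile on equal counts
theorem loopA_tail (r : List (String × Int)) (v : Int) (idx : Nat) (h : idx > 4) :
    loopA r idx (some v) "" =
      String.join ((r.takeWhile (fun u => u.2 == v)).map fmtA) := by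
  induction r generalizing idx with
  | nil => simp [loopA, join_nil_str]
  | cons u t ih =>
    rw [loopA_cons]
    by_cases hv : u.2 = v
    · rw [if_neg (by simp [hv])]
      simp only [List.takeWhile, hv, beq_self_eq_true, List.map_cons, join_cons_str]
      rw [ih (idx+1) (by omega)]
    · rw [if_pos ⟨by simp only [ne_eq, Option.some.injEq]; exact fun h' => hv h'.symm, h⟩]
      simp only [List.takeWhile]
      rw [show (u.2 == v) = false from beq_eq_false_iff_ne.mpr hv]
      simp [join_nil_str]

-- A's loop from the start equals B's selection
theorem loopA_main (r : List (String × Int)) :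
    loopA r 0 none "" =
      String.join
        ((match (r.take 5).getLast? with
          | none => r.take 5
          | some l => r.take 5 ++ (r.drop 5).takeWhile (fun u : String × Int => u.2 == l.2)).map fmtA) := by
  match r with
  | [] => simp [loopA, join_nil_str]
  | [a] =>
    rw [loopA_cons, if_neg (by simp)]
    simp [loopA, List.take, List.drop, List.getLast?_singleton,
      join_cons_str, join_nil_str, String.append_empty]
  | [a, b] =>
    rw [loopA_cons, if_neg (by simp), loopA_cons, if_neg (by simp)]
    simp [loopA, join_cons_str, join_nil_str, String.append_empty]
  | [a, b, c] =>
    rw [loopA_cons, if_neg (by simp), loopA_cons, if_neg (by simp),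
      loopA_cons, if_neg (by simp)]
    simp [loopA, join_cons_str, join_nil_str, String.append_empty]
  | [a, b, c, d] =>
    rw [loopA_cons, if_neg (by simp), loopA_cons, if_neg (by simp),
      loopA_cons, if_neg (by simp), loopA_cons, if_neg (by simp)]
    simp [loopA, join_cons_str, join_nil_str, String.append_empty]
  | a :: b :: c :: d :: e :: t =>
    rw [loopA_cons, if_neg (by simp), loopA_cons, if_neg (by simp),
      loopA_cons, if_neg (by simp), loopA_cons, if_neg (by simp),
      loopA_cons, if_neg (by simp), loopA_tail t e.2 5 (by omega)]
    simp only [List.take, List.drop, List.getLast?_cons_cons, List.getLast?_singleton]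
    rw [List.map_append, join_append_str]
    simp [join_cons_str, join_nil_str, String.append_assoc, String.append_empty]

-- ===== VERDICT (by name: the statement is the Claim_ definition above) =====
theorem authors_py_spec : Claim_equal_authors_py := by
  intro authors _
  unfold Spec_authors_py authors_py authors_py_alt
  rw [loopA_text, loopA_main, fmtB_eq_fmtA]
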